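-- pv_equiv track=rewrite | github.com/EgorVorOK/Voronkov-Python | PZ-4/PZ-4.2.py | count_and_sum_digits
-- ===== SOURCE A (Python) =====
-- def count_and_sum_digits(n):
--     count = 0
--     total_sum = 0
--
--     while n > 0:
--         last_digit = n % 10
--         count += 1
--         total_sum += last_digit
--         n //= 10
--     return count, total_sum
-- ===== SOURCE B (Python) =====
-- def count_and_sum_digits(n):
--     if n <= 0:
--         return 0, 0
--     s = str(n)
--     return len(s), sum(int(c) for c in s)
-- ===== Notes on version B (the rewrite author's own statement) =====
-- stated objective: idiomatic
-- what changed: B builds the decimal string once and takes its length and character digit-sum instead of peeling digits with repeated % and // in a loop.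
import Mathlib
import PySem

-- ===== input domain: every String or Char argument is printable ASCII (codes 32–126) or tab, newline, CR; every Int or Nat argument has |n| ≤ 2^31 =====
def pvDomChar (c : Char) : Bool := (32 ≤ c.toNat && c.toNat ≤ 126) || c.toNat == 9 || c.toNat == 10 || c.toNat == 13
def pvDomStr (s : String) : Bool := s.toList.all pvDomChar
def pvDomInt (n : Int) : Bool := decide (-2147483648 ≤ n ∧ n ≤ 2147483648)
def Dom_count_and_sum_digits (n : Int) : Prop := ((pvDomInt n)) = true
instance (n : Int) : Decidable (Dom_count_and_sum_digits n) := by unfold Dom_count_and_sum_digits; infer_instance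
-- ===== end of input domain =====

-- B replaces A's %/// digit-peeling loop by str(n): length and per-character digit sum (idiomatic, same cost).


-- ===== PORT A =====
-- the while loop of A, state (n, count, total_sum)
def casLoop (n count total : Int) : Int × Int :=
  if 0 < n then
    casLoop (PySem.Int.floordiv n 10) (count + 1) (total + PySem.Int.mod n 10)
  else (count, total)
termination_by n.toNat
decreasing_by
  have h10 : PySem.Int.floordiv n 10 = n / 10 := PySem.Int.floordiv_eq_ediv_of_pos (by omega)
  rw [h10]; omega

def count_and_sum_digits (n : Int) : Int × Int :=
  casLoop n 0 0

-- ===== PORT B =====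
-- int(c): c is always a single decimal digit here, so ofChars? never returns none; getD 0 is unreachable
def count_and_sum_digits_alt (n : Int) : Int × Int :=
  if n ≤ 0 then (0, 0)
  else
    let s := PySem.Int.toChars n
    ((s.length : Int), (s.map (fun c => (PySem.Int.ofChars? [c]).getD 0)).sum)

-- ===== PRECONDITION & SPEC =====
def Spec_count_and_sum_digits (n : Int) (out : Int × Int) : Prop := out = count_and_sum_digits_alt n
instance (n : Int) (out : Int × Int) : Decidable (Spec_count_and_sum_digits n out) := by unfold Spec_count_and_sum_digits; infer_instance

-- ===== CLAIM (what is proved, stated in full; the proofs are below) =====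
def Claim_equal_count_and_sum_digits : Prop := ∀ (n : Int), Dom_count_and_sum_digits n → Spec_count_and_sum_digits n (count_and_sum_digits n)

-- ===== LEMMAS AND PROOFS =====

-- A's loop computes length and sum of the base-10 digit list
theorem casLoop_eq_digits : ∀ (m : Nat), 0 < m → ∀ (count total : Int),
    casLoop (m : Int) count total
      = (count + ((Nat.digits 10 m).length : Int), total + ((Nat.digits 10 m).sum : Int)) := by
  intro m
  induction m using Nat.strong_induction_on with
  | _ m ih =>
    intro hm count total
    rw [casLoop]
    have hpos : (0 : Int) < (m : Int) := by exact_mod_cast hm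
    rw [if_pos hpos]
    have hfd : PySem.Int.floordiv (m : Int) 10 = ((m / 10 : Nat) : Int) := by
      exact_mod_cast PySem.Int.floordiv_natCast m 10
    have hmd : PySem.Int.mod (m : Int) 10 = ((m % 10 : Nat) : Int) := by
      exact_mod_cast PySem.Int.mod_natCast m 10
    rw [hfd, hmd, Nat.digits_def' (by norm_num) hm]
    by_cases hq : m / 10 = 0
    · rw [hq]
      have h0 : Nat.digits 10 (0 : Nat) = [] := by simp
      rw [casLoop]
      simp only [h0, List.length_cons, List.length_nil, List.sum_cons]
      rfl
    · have := ih (m / 10) (by omega) (by omega) (count + 1) (total + ((m % 10 : Nat) : Int))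
      rw [this]
      simp only [Prod.mk.injEq, List.length_cons, List.sum_cons]
      constructor <;> push_cast <;> ring

-- toDigitsCore for positive n with enough fuel = the reversed digitChar image of Nat.digits
theorem toDigitsCore_eq : ∀ (fuel m : Nat), 0 < m → m < fuel → ∀ (acc : List Char),
    Nat.toDigitsCore 10 fuel m acc = ((Nat.digits 10 m).map Nat.digitChar).reverse ++ acc := by
  intro fuel
  induction fuel with
  | zero => intro m hm hlt; omega
  | succ f ih =>
    intro m hm hlt acc
    rw [Nat.toDigitsCore]
    rw [Nat.digits_def' (by norm_num) hm]
    by_cases hq : m / 10 = 0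
    · rw [if_pos hq, hq]
      simp
    · rw [if_neg hq]
      rw [ih (m / 10) (by omega) (by omega)]
      simp

-- reading a single digit character back gives the digit
theorem ofChars_digitChar (d : Nat) (hd : d < 10) :
    (PySem.Int.ofChars? [Nat.digitChar d]).getD 0 = (d : Int) := by
  interval_cases d <;> decide

theorem count_eq_alt (n : Int) : count_and_sum_digits n = count_and_sum_digits_alt n := by
  unfold count_and_sum_digits count_and_sum_digits_alt
  by_cases hn : n ≤ 0
  · rw [if_pos hn, casLoop, if_neg (by omega)]
  · rw [if_neg hn]
    have hm : 0 < n.toNat := by omega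
    have hcast : ((n.toNat : Int)) = n := by omega
    have hA := casLoop_eq_digits n.toNat hm 0 0
    rw [hcast] at hA
    rw [hA]
    have hchars : PySem.Int.toChars n = ((Nat.digits 10 n.toNat).map Nat.digitChar).reverse ++ [] := by
      unfold PySem.Int.toChars
      rw [if_neg (by omega), Nat.toDigits]
      exact toDigitsCore_eq (n.toNat + 1) n.toNat hm (by omega) []
    rw [hchars]
    simp only [List.append_nil, List.length_reverse, List.length_map, List.map_reverse,
      List.map_map, List.sum_reverse]
    have hmap : (Nat.digits 10 n.toNat).map
        ((fun c => (PySem.Int.ofChars? [c]).getD 0) ∘ Nat.digitChar)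
        = (Nat.digits 10 n.toNat).map Nat.cast := by
      apply List.map_congr_left
      intro d hdmem
      exact ofChars_digitChar d (Nat.digits_lt_base (by norm_num) hdmem)
    rw [hmap]
    simp only [Prod.mk.injEq]
    constructor
    · ring
    · rw [Nat.cast_list_sum]
      ring

-- ===== VERDICT (by name: the statement is the Claim_ definition above) =====
theorem count_and_sum_digits_spec : Claim_equal_count_and_sum_digits := by
  intro n _
  exact count_eq_alt n
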